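-- pv_equiv track=rewrite | github.com/boldorite/nump_L40_chatbot_templates | api/services/template_renderer.py | _group_fields_by_row
-- ===== SOURCE A (Python) =====
-- def _group_fields_by_row(fields: list) -> list:
--     """row_group이 같은 필드끼리 묶어서 반환. 비연속 row_group도 올바르게 처리."""
--     from collections import OrderedDict
--
--     # row_group별로 수집
--     rg_map = OrderedDict()
--     no_group = []
--     result_order = []  # 원래 순서 유지용
--
--     for field in fields:
--         rg = field.get("row_group")
--         if rg is not None:
--             if rg not in rg_map:
--                 rg_map[rg] = []
--                 result_order.append(("group", rg))
--             rg_map[rg].append(field)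
--         else:
--             result_order.append(("single", field))
--
--     # 원래 순서대로 그룹 조립
--     groups = []
--     seen_groups = set()
--     for item_type, item in result_order:
--         if item_type == "group":
--             if item not in seen_groups:
--                 seen_groups.add(item)
--                 group = rg_map[item]
--                 # 2필드씩 분할 (3필드 이상이면 행 나눔)
--                 for i in range(0, len(group), 2):
--                     groups.append(group[i:i+2])
--         else:
--             groups.append([item])
--
--     return groups
-- ===== SOURCE B (Python) =====
-- def _group_fields_by_row(fields: list) -> list:
--     # Single pass, no dict/map and no recorded order: on the first occurrence
--     # of each row_group, gather the whole group by filtering the input once,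
--     # then peel it off two fields at a time.
--     groups = []
--     seen = set()
--     for field in fields:
--         rg = field.get("row_group")
--         if rg is None:
--             groups.append([field])
--         elif rg not in seen:
--             seen.add(rg)
--             g = [f for f in fields if f.get("row_group") == rg]
--             while g:
--                 groups.append(g[:2])
--                 g = g[2:]
--     return groups
-- ===== Notes on version B (the rewrite author's own statement) =====
-- stated objective: simpler
-- what changed: B drops A's OrderedDict row-group map and tagged result_order list entirely: a single pass over the fields emits singletons directly and, at each group's first occurrence, collects the whole group by one filter of the input and peels it off two at a time (O(n*k) per-group scan instead of A's two staged passes over auxiliary structures).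
import Mathlib
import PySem

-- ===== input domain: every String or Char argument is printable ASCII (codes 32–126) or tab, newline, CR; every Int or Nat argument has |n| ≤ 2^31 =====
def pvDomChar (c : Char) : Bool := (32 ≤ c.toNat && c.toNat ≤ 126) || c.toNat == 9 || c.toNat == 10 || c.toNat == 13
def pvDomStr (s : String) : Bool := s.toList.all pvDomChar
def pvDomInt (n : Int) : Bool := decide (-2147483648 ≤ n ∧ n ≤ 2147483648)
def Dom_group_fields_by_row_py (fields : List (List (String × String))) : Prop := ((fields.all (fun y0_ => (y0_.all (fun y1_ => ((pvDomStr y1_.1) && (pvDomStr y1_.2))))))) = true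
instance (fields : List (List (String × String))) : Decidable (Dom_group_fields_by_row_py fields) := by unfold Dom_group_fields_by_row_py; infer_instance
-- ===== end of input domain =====

-- B replaces A's two staged passes (OrderedDict row-group map + tagged result_order
-- list) by one pass that gathers each group, at its first occurrence, with a filter
-- of the input and peels it off two at a time (objective: simpler); same return value.

-- field.get("row_group"): first-match lookup in the association list (both Pythons call it)
def pvGet (f : List (String × String)) : Option String :=
  (f.find? (fun p => p.1 == "row_group")).map (·.2)

-- ===== PORT A =====
-- result_order entries: ("group", rg) | ("single", field)
inductive PvItem where
  | group : String → PvItem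
  | single : List (String × String) → PvItem
deriving DecidableEq, Repr

-- first pass: state = (rg_map, result_order)
def pvA_step1 (s : PySem.Dict String (List (List (String × String))) × List PvItem)
    (f : List (String × String)) :
    PySem.Dict String (List (List (String × String))) × List PvItem :=
  match pvGet f with
  | some rg =>
      if s.1.contains rg then (s.1.modify rg [] (· ++ [f]), s.2)
      else ((s.1.insert rg []).modify rg [] (· ++ [f]), s.2 ++ [PvItem.group rg])
  | none => (s.1, s.2 ++ [PvItem.single f])

-- 'for i in range(0, len(group), 2): groups.append(group[i:i+2])'
def pvChunkFold (g : List (List (String × String)))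
    (acc : List (List (List (String × String)))) : List (List (List (String × String))) :=
  (PySem.List.pyRange 0 (g.length : Int) 2).foldl
    (fun gs i => gs ++ [PySem.List.slice g (some i) (some (i + 2))]) acc

-- second pass: state = (groups, seen_groups); rg_map[item] is always present
-- (tags come from rg_map's keys), so the KeyError default [] is unreachable
def pvA_step2 (m : PySem.Dict String (List (List (String × String))))
    (s : List (List (List (String × String))) × PySem.Set String) (item : PvItem) :
    List (List (List (String × String))) × PySem.Set String :=
  match item with
  | PvItem.group rg =>
      if s.2.contains rg then s
      else (pvChunkFold (m.getD rg []) s.1, PySem.Set.add s.2 rg)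
  | PvItem.single f => (s.1 ++ [[f]], s.2)

def group_fields_by_row_py (fields : List (List (String × String))) :
    List (List (List (String × String))) :=
  let p := fields.foldl pvA_step1 (PySem.Dict.empty, [])
  (p.2.foldl (pvA_step2 p.1) ([], PySem.Set.empty)).1

-- ===== PORT B =====
-- 'while g: groups.append(g[:2]); g = g[2:]' — g[:2] is take 2, g[2:] is drop 2
def pvChunk (g : List (List (String × String))) : List (List (List (String × String))) :=
  match g with
  | [] => []
  | a :: r => (a :: r.take 1) :: pvChunk (r.drop 1)
termination_by g.length
decreasing_by simp only [List.length_drop, List.length_cons]; omega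

-- the single pass: state = (groups, seen)
def pvB_step (fields : List (List (String × String)))
    (s : List (List (List (String × String))) × PySem.Set String)
    (field : List (String × String)) :
    List (List (List (String × String))) × PySem.Set String :=
  match pvGet field with
  | none => (s.1 ++ [[field]], s.2)
  | some rg =>
      if s.2.contains rg then s
      else (s.1 ++ pvChunk (fields.filter (fun f => pvGet f == some rg)),
            PySem.Set.add s.2 rg)

def group_fields_by_row_py_alt (fields : List (List (String × String))) :
    List (List (List (String × String))) :=
  (fields.foldl (pvB_step fields) ([], PySem.Set.empty)).1

-- ===== PRECONDITION & SPEC =====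
def Spec_group_fields_by_row_py (fields : List (List (String × String))) (out : List (List (List (String × String)))) : Prop := out = group_fields_by_row_py_alt fields
instance (fields : List (List (String × String))) (out : List (List (List (String × String)))) : Decidable (Spec_group_fields_by_row_py fields out) := by unfold Spec_group_fields_by_row_py; infer_instance

-- ===== CLAIM (what is proved, stated in full; the proofs are below) =====
def Claim_equal_group_fields_by_row_py : Prop := ∀ (fields : List (List (String × String))), Dom_group_fields_by_row_py fields → Spec_group_fields_by_row_py fields (group_fields_by_row_py fields)

-- ===== LEMMAS AND PROOFS =====

-- A's first-pass map, characterised: the entry for rg is the filter of the fields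
theorem pvMapFilter (xs : List (List (String × String)))
    (m : PySem.Dict String (List (List (String × String)))) (ord : List PvItem)
    (rg : String) :
    (xs.foldl pvA_step1 (m, ord)).1.getD rg [] =
      m.getD rg [] ++ xs.filter (fun f => pvGet f == some rg) := by
  induction xs generalizing m ord with
  | nil => simp
  | cons f r ih =>
    simp only [List.foldl_cons, pvA_step1, List.filter_cons]
    cases hg : pvGet f with
    | none => simpa using ih m _
    | some rg' =>
      cases hc : m.contains rg' with
      | true =>
        simp only [hc, if_true]
        rw [ih _ _, PySem.Dict.getD_modify]
        by_cases h : rg = rg'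
        · subst h; simp
        · simp [h, Ne.symm h]
      | false =>
        simp only [hc, Bool.false_eq_true, if_false]
        rw [ih _ _, PySem.Dict.getD_modify]
        by_cases h : rg = rg'
        · subst h
          rw [PySem.Dict.getD_insert_self, PySem.Dict.getD_of_not_contains m [] hc]
          simp
        · simp [h, Ne.symm h, PySem.Dict.getD_insert]

-- the order A records, reconstructed from the fields and the set of already-seen tags
def pvOrderOf (s : PySem.Set String) : List (List (String × String)) → List PvItem
  | [] => []
  | f :: r =>
    match pvGet f with
    | none => PvItem.single f :: pvOrderOf s r
    | some rg =>
        if s.contains rg then pvOrderOf s r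
        else PvItem.group rg :: pvOrderOf (PySem.Set.add s rg) r

theorem pvSet_contains_add (s : PySem.Set String) (x y : String) :
    (PySem.Set.add s x).contains y = (y == x || s.contains y) := by
  by_cases h : x ∈ s <;> by_cases hyx : y = x <;>
    simp [PySem.Set.add, PySem.Set.contains, h, hyx]

theorem pvOrd_eq (xs : List (List (String × String)))
    (m : PySem.Dict String (List (List (String × String)))) (ord : List PvItem)
    (s : PySem.Set String) (h : ∀ k, m.contains k = s.contains k) :
    (xs.foldl pvA_step1 (m, ord)).2 = ord ++ pvOrderOf s xs := by
  induction xs generalizing m ord s with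
  | nil => simp [pvOrderOf]
  | cons f r ih =>
    simp only [List.foldl_cons, pvA_step1, pvOrderOf]
    cases hg : pvGet f with
    | none => rw [ih _ _ s h]; simp
    | some rg =>
      cases hc : s.contains rg with
      | true =>
        simp only [h rg, hc, if_true]
        exact ih _ _ s (fun k => by
          rw [PySem.Dict.contains_modify, h k]
          by_cases hk : k = rg
          · subst hk
            simp only [PySem.Set.contains, List.contains_iff_exists_mem_beq] at hc
            obtain ⟨a, ha, hb⟩ := hc
            simp [eq_of_beq hb ▸ ha]
          · simp [hk])
      | false =>
        simp only [h rg, hc, Bool.false_eq_true, if_false]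
        rw [ih _ _ (PySem.Set.add s rg) (fun k => by
          rw [PySem.Dict.contains_modify, PySem.Dict.contains_insert,
            pvSet_contains_add, h k]
          by_cases hk : k = rg <;> simp [hk])]
        simp

-- A's range-and-slice chunk loop over List.range, with a natural count
theorem pvChunk_aux (g : List (List (String × String)))
    (acc : List (List (List (String × String)))) :
    (List.range ((g.length + 1) / 2)).foldl
      (fun gs (k : Nat) => gs ++ [PySem.List.slice g (some (2 * (k : Int))) (some (2 * (k : Int) + 2))]) acc
      = acc ++ pvChunk g := by
  induction g using pvChunk.induct generalizing acc with
  | case1 => simp [pvChunk]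
  | case2 a r ih =>
    cases r with
    | nil =>
      rw [show (([a].length + 1) / 2) = 1 by norm_num, List.range_one, List.foldl_cons, List.foldl_nil]
      show acc ++ [PySem.List.slice [a] (some (2 * ((0:Nat) : Int))) (some (2 * ((0:Nat) : Int) + 2))] = acc ++ pvChunk [a]
      rw [show (2 * ((0:Nat) : Int)) = ((0:Nat) : Int) by norm_num,
        show (((0:Nat) : Int) + 2) = ((2:Nat) : Int) by norm_num,
        PySem.List.slice_natCast]
      simp [pvChunk]
    | cons b r2 =>
      have hcnt : ((a :: b :: r2).length + 1) / 2 = (r2.length + 1) / 2 + 1 := by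
        simp; omega
      rw [hcnt, List.range_succ_eq_map, List.foldl_cons, List.foldl_map]
      have hslice0 : PySem.List.slice (a :: b :: r2) (some (2 * ((0 : Nat) : Int)))
          (some (2 * ((0 : Nat) : Int) + 2)) = [a, b] := by
        rw [show (2 * ((0 : Nat) : Int)) = ((0 : Nat) : Int) by norm_num,
          show (((0 : Nat) : Int) + 2) = ((2 : Nat) : Int) by norm_num,
          PySem.List.slice_natCast]
        simp
      have hstep : (fun (gs : List (List (List (String × String)))) (k : Nat) =>
          gs ++ [PySem.List.slice (a :: b :: r2) (some (2 * ((Nat.succ k : Nat) : Int)))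
            (some (2 * ((Nat.succ k : Nat) : Int) + 2))])
          = (fun (gs : List (List (List (String × String)))) (k : Nat) =>
          gs ++ [PySem.List.slice r2 (some (2 * (k : Int))) (some (2 * (k : Int) + 2))]) := by
        funext gs k
        congr 1
        rw [show (2 * ((Nat.succ k : Nat) : Int)) = ((2 * k + 2 : Nat) : Int) by push_cast; ring,
          show (((2 * k + 2 : Nat) : Int) + 2) = ((2 * k + 4 : Nat) : Int) by push_cast; ring]
        rw [show (2 * (k : Int)) = ((2 * k : Nat) : Int) by push_cast; ring]
        rw [show (((2 * k : Nat) : Int) + 2) = ((2 * k + 2 : Nat) : Int) by push_cast; ring]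
        rw [PySem.List.slice_natCast, PySem.List.slice_natCast]
        have hd : List.drop (2 * k + 2) (a :: b :: r2) = List.drop (2 * k) r2 := by
          rw [show 2 * k + 2 = 2 * k + 1 + 1 by ring, List.drop_succ_cons, List.drop_succ_cons]
        simp only [show 2 * k + 4 - (2 * k + 2) = 2 by omega, show 2 * k + 2 - 2 * k = 2 by omega, hd]
      rw [hslice0, hstep]
      rw [show List.drop 1 (b :: r2) = r2 from rfl] at ih
      rw [ih]
      simp [pvChunk]

-- A's chunk fold = B's take/drop chunking
theorem pvChunkFold_eq (g : List (List (String × String)))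
    (acc : List (List (List (String × String)))) :
    pvChunkFold g acc = acc ++ pvChunk g := by
  unfold pvChunkFold
  rw [PySem.List.pyRange_of_pos 0 (g.length : Int) (by norm_num)]
  have hcnt : (if (0 : Int) < (g.length : Int) then (((g.length : Int) - 0 + 2 - 1) / 2).toNat else 0)
      = (g.length + 1) / 2 := by
    rcases Nat.eq_zero_or_pos g.length with h0 | h0
    · simp [h0]
    · have hlt : (0 : Int) < (g.length : Int) := by exact_mod_cast h0
      rw [if_pos hlt]; omega
  rw [hcnt, List.foldl_map]
  have hfun : (fun (gs : List (List (List (String × String)))) (k : Nat) =>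
      gs ++ [PySem.List.slice g (some (0 + 2 * (k : Int))) (some (0 + 2 * (k : Int) + 2))])
      = (fun (gs : List (List (List (String × String)))) (k : Nat) =>
      gs ++ [PySem.List.slice g (some (2 * (k : Int))) (some (2 * (k : Int) + 2))]) := by
    funext gs k; norm_num
  rw [hfun, pvChunk_aux]

-- A's second pass over the reconstructed order = B's single pass over the fields
theorem pvPass2_eq (m : PySem.Dict String (List (List (String × String))))
    (fields : List (List (String × String)))
    (hm : ∀ rg, m.getD rg [] = fields.filter (fun f => pvGet f == some rg))
    (xs : List (List (String × String))) (s : PySem.Set String)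
    (acc : List (List (List (String × String)))) :
    (pvOrderOf s xs).foldl (pvA_step2 m) (acc, s) = xs.foldl (pvB_step fields) (acc, s) := by
  induction xs generalizing s acc with
  | nil => rfl
  | cons f r ih =>
    simp only [List.foldl_cons, pvB_step, pvOrderOf]
    cases hg : pvGet f with
    | none => simp only [List.foldl_cons, pvA_step2]; exact ih _ _
    | some rg =>
      cases hc : s.contains rg with
      | true => simp only [hc, if_true]; exact ih _ _
      | false =>
        simp only [hc, Bool.false_eq_true, if_false, List.foldl_cons, pvA_step2,
          hm rg, pvChunkFold_eq]
        exact ih _ _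

-- ===== VERDICT (by name: the statement is the Claim_ definition above) =====
theorem group_fields_by_row_py_spec : Claim_equal_group_fields_by_row_py := by
  intro fields _
  show ((fields.foldl pvA_step1 (PySem.Dict.empty, [])).2.foldl
      (pvA_step2 (fields.foldl pvA_step1 (PySem.Dict.empty, [])).1) ([], PySem.Set.empty)).1 =
    (fields.foldl (pvB_step fields) ([], PySem.Set.empty)).1
  rw [pvOrd_eq fields PySem.Dict.empty [] PySem.Set.empty (fun k => rfl)]
  simp only [List.nil_append]
  rw [pvPass2_eq _ fields (fun rg => by
      have := pvMapFilter fields PySem.Dict.empty [] rg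
      simpa using this)]
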